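-- pv_equiv track=rewrite | github.com/981377660LMT/algorithm-study | 6_tree/前缀树trie/好题/最长前缀序列-图的最长路.py | solve
-- ===== SOURCE A (Python) =====
-- from collections import defaultdict
-- from functools import lru_cache
-- from typing import List
--
-- def solve(words: List[str]) -> int:
--     @lru_cache(None)
--     def dfs(cur: int) -> int:
--         """有向图的最长路"""
--         return 1 + max((dfs(next) for next in adjMap[cur]), default=0)
--
--     id_ = defaultdict(lambda: len(id_))
--     adjMap = defaultdict(set)
--     for word in words:
--         pre = word[:-1]
--         adjMap[id_[pre]].add(id_[word])
--     return max((dfs(id_[word]) for word in words), default=0)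
-- ===== SOURCE B (Python) =====
-- from functools import lru_cache
-- from typing import List
--
--
-- def solve(words: List[str]) -> int:
--     wordset = set(words)
--
--     @lru_cache(None)
--     def length(word: str) -> int:
--         """longest chain of words ending at `word` (each step drops the last char)"""
--         pre = word[:-1]
--         return 1 + length(pre) if pre in wordset else 1
--
--     return max(map(length, words), default=0)
-- ===== Notes on version B (the rewrite author's own statement) =====
-- stated objective: simpler
-- what changed: Replaces A's id-assignment, adjacency-set DAG and downward longest-path DFS over integer node ids by a memoized upward recursion on the unique one-char-shorter prefix directly over a set of the words (chain length ending at each word), taking the max over the words.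
import Mathlib
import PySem

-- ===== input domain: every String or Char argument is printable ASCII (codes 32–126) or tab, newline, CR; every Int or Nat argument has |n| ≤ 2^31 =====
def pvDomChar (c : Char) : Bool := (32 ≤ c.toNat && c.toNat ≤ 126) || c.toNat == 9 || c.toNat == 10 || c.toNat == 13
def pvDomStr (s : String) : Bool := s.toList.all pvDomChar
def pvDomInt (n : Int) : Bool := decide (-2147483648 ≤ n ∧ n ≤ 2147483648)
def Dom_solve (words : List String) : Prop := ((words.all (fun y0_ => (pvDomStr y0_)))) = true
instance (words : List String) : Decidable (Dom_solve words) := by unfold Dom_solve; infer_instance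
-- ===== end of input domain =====

-- B replaces A's id-assignment / adjacency-set DAG / downward longest-path DFS by a memoized
-- upward recursion on the one-char-shorter prefix over a set of the words (objective: simpler).

-- ===== PORT A =====
-- defaultdict(lambda: len(id_)) subscript: returns the id and the (possibly extended) dict
def pvIdGet (d : PySem.Dict String Int) (k : String) : Int × PySem.Dict String Int :=
  match d.get? k with
  | some v => (v, d)
  | none => ((d.size : Int), d.insert k (d.size : Int))

-- body of A's build loop: adjMap[id_[pre]].add(id_[word])
def pvStep (st : PySem.Dict String Int × PySem.Dict Int (PySem.Set Int)) (word : String) :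
    PySem.Dict String Int × PySem.Dict Int (PySem.Set Int) :=
  let pre := PySem.Str.slice word none (some (-1))
  let r1 := pvIdGet st.1 pre
  let r2 := pvIdGet r1.2 word
  (r2.2, st.2.insert r1.1 (PySem.Set.add (st.2.getD r1.1 PySem.Set.empty) r2.1))

def pvBuild (words : List String) :
    PySem.Dict String Int × PySem.Dict Int (PySem.Set Int) :=
  words.foldl pvStep (PySem.Dict.empty, PySem.Dict.empty)

-- totality fuel for A's dfs (the recursion depth is bounded by the longest word; Pre_solve
-- excludes the empty word, on which Python's dfs would recurse forever)
def pvFuel (words : List String) : Nat := 1 + words.foldl (fun n w => n + w.toList.length) 0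

-- dfs(cur) = 1 + max((dfs(next) for next in adjMap[cur]), default=0)
def pvDfs (adj : PySem.Dict Int (PySem.Set Int)) : Nat → Int → Int
  | 0, _ => 0
  | fuel+1, cur =>
      1 + PySem.List.maxD ((adj.getD cur PySem.Set.empty).map (pvDfs adj fuel)) (fun x => x) 0

def solve (words : List String) : Int :=
  let b := pvBuild words
  PySem.List.maxD (words.map (fun w => pvDfs b.2 (pvFuel words) (b.1.getD w 0))) (fun x => x) 0

-- ===== PORT B =====
-- length(word) = 1 + length(word[:-1]) if word[:-1] in wordset else 1  (memoized in Python;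
-- the dite on the empty word is only the termination guard: Python diverges there, and
-- Pre_solve keeps the empty word out of the set, so that branch is never taken under Pre_)
def pvChainLen (ws : PySem.Set String) (w : String) : Int :=
  let pre := PySem.Str.slice w none (some (-1))
  if pre ∈ ws then
    (if h : w.toList = [] then 1 else 1 + pvChainLen ws pre)
  else 1
termination_by w.toList.length
decreasing_by
  simp only [PySem.Str.slice_to_neg_one, List.length_dropLast]
  have : w.toList.length ≠ 0 := fun hl => h (List.eq_nil_of_length_eq_zero hl)
  omega

def solve_alt (words : List String) : Int :=
  let ws := PySem.Set.ofList words
  PySem.List.maxD (words.map (pvChainLen ws)) (fun x => x) 0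

-- ===== PRECONDITION & SPEC =====
-- Pre_ excludes inputs containing the empty word: there Python A's dfs hits the self-loop
-- '' -> '' and raises RecursionError (B's recursion diverges the same way).
def Pre_solve (words : List String) : Prop := "" ∉ words
instance (words : List String) : Decidable (Pre_solve words) := by unfold Pre_solve; infer_instance
def pvWitness_solve : List String := ["a", "ab", "abc", "x"]

def Spec_solve (words : List String) (out : Int) : Prop := out = solve_alt words
instance (words : List String) (out : Int) : Decidable (Spec_solve words out) := by unfold Spec_solve; infer_instance

-- ===== CLAIM (what is proved, stated in full; the proofs are below) =====
def Claim_equal_solve : Prop := ∀ (words : List String), Dom_solve words → Pre_solve words → Spec_solve words (solve words)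

-- ===== LEMMAS AND PROOFS =====

-- word[:-1], at the specification level
def pvP (w : String) : String := PySem.Str.slice w none (some (-1))

theorem pvP_toList (w : String) : (pvP w).toList = w.toList.dropLast :=
  PySem.Str.slice_to_neg_one w

-- maxD toolkit (key = identity, Int values)
theorem pvLe_maxD {l : List Int} {x : Int} (h : x ∈ l) (d : Int) :
    x ≤ PySem.List.maxD l (fun y => y) d := by
  unfold PySem.List.maxD
  cases hm : PySem.List.max? l (fun y => y) with
  | none => exact absurd ((PySem.List.max?_eq_none_iff l _).mp hm ▸ h) (List.not_mem_nil)
  | some m => simpa using PySem.List.max?_isMax hm x h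

theorem pvMaxD_cases (l : List Int) (d : Int) :
    PySem.List.maxD l (fun y => y) d = d ∨ PySem.List.maxD l (fun y => y) d ∈ l := by
  unfold PySem.List.maxD
  cases hm : PySem.List.max? l (fun y => y) with
  | none => simp
  | some m => simpa using Or.inr (PySem.List.max?_mem hm)

-- pvDfs basics
theorem pvDfs_nonneg (adj : PySem.Dict Int (PySem.Set Int)) (fuel : Nat) (c : Int) :
    0 ≤ pvDfs adj fuel c := by
  induction fuel generalizing c with
  | zero => simp [pvDfs]
  | succ n ih =>
    rw [pvDfs]
    rcases pvMaxD_cases ((adj.getD c PySem.Set.empty).map (pvDfs adj n)) 0 with h | h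
    · omega
    · obtain ⟨x, -, hx⟩ := List.mem_map.mp h
      have := ih x; omega

theorem pvDfs_mono (adj : PySem.Dict Int (PySem.Set Int)) :
    ∀ {f g : Nat}, f ≤ g → ∀ c, pvDfs adj f c ≤ pvDfs adj g c := by
  intro f g
  induction g generalizing f with
  | zero => intro h c; obtain rfl := Nat.le_zero.mp h; exact le_rfl
  | succ n ih =>
    intro h c
    cases f with
    | zero => exact le_trans (by simp [pvDfs]) (pvDfs_nonneg adj (n+1) c)
    | succ m =>
      rw [pvDfs, pvDfs]
      have hmn : m ≤ n := Nat.succ_le_succ_iff.mp h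
      rcases pvMaxD_cases ((adj.getD c PySem.Set.empty).map (pvDfs adj m)) 0 with h0 | hmem
      · rw [h0]
        rcases pvMaxD_cases ((adj.getD c PySem.Set.empty).map (pvDfs adj n)) 0 with h1 | hmem1
        · omega
        · obtain ⟨x, -, hx⟩ := List.mem_map.mp hmem1
          have := pvDfs_nonneg adj n x; omega
      · obtain ⟨x, hxm, hx⟩ := List.mem_map.mp hmem
        have h1 : pvDfs adj m x ≤ pvDfs adj n x := ih hmn x
        have h2 : pvDfs adj n x ≤ PySem.List.maxD ((adj.getD c PySem.Set.empty).map (pvDfs adj n)) (fun y => y) 0 :=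
          pvLe_maxD (List.mem_map.mpr ⟨x, hxm, rfl⟩) 0
        omega

-- pvChainLen basics
theorem pvChainLen_pos (ws : PySem.Set String) (w : String) : 1 ≤ pvChainLen ws w := by
  fun_induction pvChainLen ws w with
  | case1 => simp
  | case2 _ _ _ ih => omega
  | case3 => simp

theorem pvChainLen_step (ws : PySem.Set String) (w : String) (h1 : pvP w ∈ ws)
    (h2 : w.toList ≠ []) : pvChainLen ws w = 1 + pvChainLen ws (pvP w) := by
  rw [pvChainLen]
  simp only [pvP] at h1
  simp [h1, h2, pvP]

-- ===== the build-loop invariant =====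
def pvInv (idm : PySem.Dict String Int) (adj : PySem.Dict Int (PySem.Set Int))
    (pref : List String) : Prop :=
  (∀ x ∈ pref, (idm.get? x).isSome ∧ (idm.get? (pvP x)).isSome) ∧
  (∀ s i, idm.get? s = some i → 0 ≤ i ∧ i < (idm.size : Int)) ∧
  (∀ s t i, idm.get? s = some i → idm.get? t = some i → s = t) ∧
  (∀ k, adj.contains k = true → ∃ s, idm.get? s = some k) ∧
  (∀ s i j, idm.get? s = some i →
    (j ∈ (adj.getD i PySem.Set.empty : List Int) ↔
      ∃ x ∈ pref, pvP x = s ∧ idm.get? x = some j))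

theorem pvIdGet_not_contains_eq {d : PySem.Dict String Int} {k : String}
    (h : d.get? k = none) : d.contains k = false := by
  rw [PySem.Dict.contains_eq_isSome_get?, h]; rfl

theorem pvIdGet_self (d : PySem.Dict String Int) (k : String) :
    (pvIdGet d k).2.get? k = some (pvIdGet d k).1 := by
  cases hd : d.get? k <;> simp [pvIdGet, hd]

theorem pvIdGet_mono (d : PySem.Dict String Int) (k : String) {s : String} {v : Int}
    (h : d.get? s = some v) : (pvIdGet d k).2.get? s = some v := by
  cases hd : d.get? k with
  | some w => simpa [pvIdGet, hd] using h
  | none =>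
    simp only [pvIdGet, hd, PySem.Dict.get?_insert]
    split
    · next he => rw [he] at h; rw [h] at hd; cases hd
    · exact h

theorem pvIdGet_new (d : PySem.Dict String Int) (k : String) {s : String} {v : Int}
    (h : (pvIdGet d k).2.get? s = some v) :
    d.get? s = some v ∨ (s = k ∧ v = (d.size : Int) ∧ d.get? k = none) := by
  cases hd : d.get? k with
  | some w => rw [pvIdGet, hd] at h; exact Or.inl h
  | none =>
    rw [pvIdGet, hd] at h
    simp only [PySem.Dict.get?_insert] at h
    by_cases he : s = k
    · rw [if_pos he] at h
      exact Or.inr ⟨he, (Option.some_inj.mp h).symm, rfl⟩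
    · rw [if_neg he] at h; exact Or.inl h

theorem pvIdGet_size (d : PySem.Dict String Int) (k : String) :
    d.size ≤ (pvIdGet d k).2.size := by
  cases hd : d.get? k with
  | some w => simp [pvIdGet, hd]
  | none =>
    simp [pvIdGet, hd, PySem.Dict.size_insert, pvIdGet_not_contains_eq hd]

theorem pvIdGet_bound {d : PySem.Dict String Int} (k : String)
    (h2 : ∀ s i, d.get? s = some i → 0 ≤ i ∧ i < (d.size : Int)) :
    ∀ s i, (pvIdGet d k).2.get? s = some i → 0 ≤ i ∧ i < ((pvIdGet d k).2.size : Int) := by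
  intro s i h
  rcases pvIdGet_new d k h with hold | ⟨rfl, rfl, hnone⟩
  · have := h2 s i hold
    have := pvIdGet_size d k
    omega
  · simp [pvIdGet, hnone, PySem.Dict.size_insert, pvIdGet_not_contains_eq hnone]

theorem pvIdGet_inj {d : PySem.Dict String Int} (k : String)
    (h2 : ∀ s i, d.get? s = some i → 0 ≤ i ∧ i < (d.size : Int))
    (h3 : ∀ s t i, d.get? s = some i → d.get? t = some i → s = t) :
    ∀ s t i, (pvIdGet d k).2.get? s = some i → (pvIdGet d k).2.get? t = some i → s = t := by
  intro s t i hs ht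
  rcases pvIdGet_new d k hs with hs' | ⟨hsk, hvs, hnone⟩
  · rcases pvIdGet_new d k ht with ht' | ⟨htk, hvt, hnone⟩
    · exact h3 s t i hs' ht'
    · exact absurd (hvt ▸ (h2 s _ hs').2) (by omega)
  · rcases pvIdGet_new d k ht with ht' | ⟨htk, hvt, hnone'⟩
    · exact absurd (hvs ▸ (h2 t _ ht').2) (by omega)
    · rw [hsk, htk]

theorem pvInv_init : pvInv PySem.Dict.empty PySem.Dict.empty [] := by
  refine ⟨by simp, ?_, ?_, ?_, ?_⟩
  · intro s i h; simp [PySem.Dict.get?_empty] at h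
  · intro s t i h; simp [PySem.Dict.get?_empty] at h
  · intro k h; rw [PySem.Dict.contains_eq_isSome_get?, PySem.Dict.get?_empty] at h; simp at h
  · intro s i j h; simp [PySem.Dict.get?_empty] at h

theorem pvInv_step_abs (idm d1 d2 : PySem.Dict String Int)
    (adj : PySem.Dict Int (PySem.Set Int)) (pref : List String) (w : String) (i j : Int)
    (hd1 : pvIdGet idm (pvP w) = (i, d1)) (hd2 : pvIdGet d1 w = (j, d2))
    (h : pvInv idm adj pref) :
    pvInv d2 (adj.insert i (PySem.Set.add (adj.getD i PySem.Set.empty) j)) (pref ++ [w]) := by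
  obtain ⟨I1, I2, I3, I4, I5⟩ := h
  have f1 : d1.get? (pvP w) = some i := by
    have := pvIdGet_self idm (pvP w); rw [hd1] at this; exact this
  have f2 : d2.get? w = some j := by
    have := pvIdGet_self d1 w; rw [hd2] at this; exact this
  have fmono1 : ∀ {s v}, idm.get? s = some v → d1.get? s = some v := by
    intro s v hv; have := pvIdGet_mono idm (pvP w) hv; rw [hd1] at this; exact this
  have fmono2 : ∀ {s v}, d1.get? s = some v → d2.get? s = some v := by
    intro s v hv; have := pvIdGet_mono d1 w hv; rw [hd2] at this; exact this
  have fmono : ∀ {s v}, idm.get? s = some v → d2.get? s = some v :=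
    fun hv => fmono2 (fmono1 hv)
  have f3 : d2.get? (pvP w) = some i := fmono2 f1
  have fsz1 : idm.size ≤ d1.size := by
    have := pvIdGet_size idm (pvP w); rw [hd1] at this; exact this
  have fb1 : ∀ s v, d1.get? s = some v → 0 ≤ v ∧ v < (d1.size : Int) := by
    intro s v hv
    have := pvIdGet_bound (d := idm) (pvP w) I2 s v (by rw [hd1]; exact hv)
    rw [hd1] at this; exact this
  have fb2 : ∀ s v, d2.get? s = some v → 0 ≤ v ∧ v < (d2.size : Int) := by
    intro s v hv
    have := pvIdGet_bound (d := d1) w fb1 s v (by rw [hd2]; exact hv)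
    rw [hd2] at this; exact this
  have finj1 : ∀ s t v, d1.get? s = some v → d1.get? t = some v → s = t := by
    intro s t v hs ht
    exact pvIdGet_inj (d := idm) (pvP w) I2 I3 s t v (by rw [hd1]; exact hs) (by rw [hd1]; exact ht)
  have finj2 : ∀ s t v, d2.get? s = some v → d2.get? t = some v → s = t := by
    intro s t v hs ht
    exact pvIdGet_inj (d := d1) w fb1 finj1 s t v (by rw [hd2]; exact hs) (by rw [hd2]; exact ht)
  have fnew : ∀ {s v}, d2.get? s = some v →
      idm.get? s = some v ∨ ((idm.size : Int) ≤ v ∧ idm.get? s = none) := by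
    intro s v hv
    have hv2 : (pvIdGet d1 w).2.get? s = some v := by rw [hd2]; exact hv
    rcases pvIdGet_new d1 w hv2 with h1 | ⟨hk, hval, hn⟩
    · rcases pvIdGet_new idm (pvP w) (by rw [hd1]; exact h1) with h0 | ⟨hk0, hval0, hn0⟩
      · exact Or.inl h0
      · exact Or.inr ⟨by omega, by rw [hk0]; exact hn0⟩
    · refine Or.inr ⟨?_, ?_⟩
      · omega
      · rw [hk]
        cases hw : idm.get? w with
        | none => rfl
        | some b => rw [fmono1 hw] at hn; cases hn
  have ffresh : ∀ k : Int, (idm.size : Int) ≤ k →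
      adj.getD k PySem.Set.empty = PySem.Set.empty := by
    intro k hk
    cases hcon : adj.contains k with
    | false => exact PySem.Dict.getD_of_not_contains adj _ hcon
    | true =>
      obtain ⟨s, hsk⟩ := I4 k hcon
      have := I2 s k hsk
      omega
  refine ⟨?_, fb2, finj2, ?_, ?_⟩
  · intro x hx
    rcases List.mem_append.mp hx with hxp | hxw
    · obtain ⟨h1s, h2s⟩ := I1 x hxp
      obtain ⟨a, ha⟩ := Option.isSome_iff_exists.mp h1s
      obtain ⟨b, hb⟩ := Option.isSome_iff_exists.mp h2s
      exact ⟨by rw [fmono ha]; rfl, by rw [fmono hb]; rfl⟩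
    · obtain rfl := List.mem_singleton.mp hxw
      exact ⟨by rw [f2]; rfl, by rw [f3]; rfl⟩
  · intro k hcon
    rw [PySem.Dict.contains_insert] at hcon
    rcases Bool.or_eq_true_iff.mp hcon with hk | hk
    · exact ⟨pvP w, by rw [eq_of_beq hk]; exact f3⟩
    · obtain ⟨s, hsk⟩ := I4 k hk
      exact ⟨s, fmono hsk⟩
  · intro s ii j' hs
    rw [PySem.Dict.getD_insert]
    by_cases hii : ii = i
    · subst hii
      obtain rfl : s = pvP w := finj2 s (pvP w) ii hs f3
      rw [if_pos rfl, PySem.Set.mem_add]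
      constructor
      · rintro (hmem | rfl)
        · cases hc : idm.get? (pvP w) with
          | none =>
            have hfresh : (idm.size : Int) ≤ ii := by
              rcases pvIdGet_new idm (pvP w) (by rw [hd1]; exact f1) with h0 | ⟨hk0, hval0, hn0⟩
              · rw [h0] at hc; cases hc
              · omega
            rw [ffresh ii hfresh] at hmem
            cases hmem
          | some a =>
            obtain rfl : a = ii := Option.some_inj.mp ((fmono hc).symm.trans f3)
            obtain ⟨x, hxp, hpx, hxid⟩ := (I5 (pvP w) a j' hc).mp hmem
            exact ⟨x, List.mem_append_left _ hxp, hpx, fmono hxid⟩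
        · exact ⟨w, List.mem_append_right _ (List.mem_singleton.mpr rfl), rfl, f2⟩
      · rintro ⟨x, hx, hpx, hxid⟩
        rcases List.mem_append.mp hx with hxp | hxw
        · obtain ⟨h1s, h2s⟩ := I1 x hxp
          obtain ⟨b, hb⟩ := Option.isSome_iff_exists.mp h1s
          obtain ⟨a, ha⟩ := Option.isSome_iff_exists.mp h2s
          obtain rfl : b = j' := Option.some_inj.mp ((fmono hb).symm.trans hxid)
          have ha' : idm.get? (pvP w) = some a := by rw [← hpx]; exact ha
          obtain rfl : a = ii := Option.some_inj.mp ((fmono ha').symm.trans f3)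
          exact Or.inl ((I5 (pvP w) a b ha').mpr ⟨x, hxp, hpx, hb⟩)
        · obtain rfl := List.mem_singleton.mp hxw
          exact Or.inr (Option.some_inj.mp (f2.symm.trans hxid)).symm
    · rw [if_neg hii]
      have hsnp : s ≠ pvP w := by
        intro he; rw [he] at hs
        exact hii (Option.some_inj.mp (hs.symm.trans f3))
      constructor
      · intro hmem
        rcases fnew hs with hold | ⟨hge, hnoneS⟩
        · obtain ⟨x, hxp, hpx, hxid⟩ := (I5 s ii j' hold).mp hmem
          exact ⟨x, List.mem_append_left _ hxp, hpx, fmono hxid⟩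
        · rw [ffresh ii hge] at hmem
          cases hmem
      · rintro ⟨x, hx, hpx, hxid⟩
        rcases List.mem_append.mp hx with hxp | hxw
        · obtain ⟨h1s, h2s⟩ := I1 x hxp
          obtain ⟨b, hb⟩ := Option.isSome_iff_exists.mp h1s
          obtain ⟨a, ha⟩ := Option.isSome_iff_exists.mp h2s
          obtain rfl : b = j' := Option.some_inj.mp ((fmono hb).symm.trans hxid)
          have has : idm.get? s = some a := by rw [← hpx]; exact ha
          obtain rfl : a = ii := Option.some_inj.mp ((fmono has).symm.trans hs)
          exact (I5 s a b has).mpr ⟨x, hxp, hpx, hb⟩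
        · obtain rfl := List.mem_singleton.mp hxw
          exact absurd hpx.symm hsnp

theorem pvInv_step (idm : PySem.Dict String Int) (adj : PySem.Dict Int (PySem.Set Int))
    (pref : List String) (w : String) (h : pvInv idm adj pref) :
    pvInv (pvStep (idm, adj) w).1 (pvStep (idm, adj) w).2 (pref ++ [w]) :=
  pvInv_step_abs idm (pvIdGet idm (pvP w)).2 (pvStep (idm, adj) w).1 adj pref w
    (pvIdGet idm (pvP w)).1 (pvIdGet (pvIdGet idm (pvP w)).2 w).1 rfl rfl h

theorem pvInv_fold (l : List String) :
    ∀ (st : PySem.Dict String Int × PySem.Dict Int (PySem.Set Int)) (pref : List String),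
      pvInv st.1 st.2 pref → pvInv (l.foldl pvStep st).1 (l.foldl pvStep st).2 (pref ++ l) := by
  induction l with
  | nil => intro st pref h; simpa using h
  | cons w t ih =>
    intro st pref h
    have h1 := pvInv_step st.1 st.2 pref w h
    have := ih (pvStep st w) (pref ++ [w]) (by simpa using h1)
    simpa using this

theorem pvInv_build (words : List String) :
    pvInv (pvBuild words).1 (pvBuild words).2 words := by
  have := pvInv_fold words (PySem.Dict.empty, PySem.Dict.empty) [] pvInv_init
  simpa [pvBuild] using this

-- ===== the two inequalities =====
theorem pv_toList_ne (words : List String) (hpre : "" ∉ words) {s : String}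
    (hs : s ∈ words) : s.toList ≠ [] := by
  intro hnil
  exact hpre (String.toList_eq_nil_iff.mp hnil ▸ hs)

theorem pv_solve_alt_eq (words : List String) :
    solve_alt words =
      PySem.List.maxD (words.map (pvChainLen (PySem.Set.ofList words))) (fun x => x) 0 := rfl

theorem pv_solve_eq (words : List String) :
    solve words =
      PySem.List.maxD (words.map (fun w =>
        pvDfs (pvBuild words).2 (pvFuel words) ((pvBuild words).1.getD w 0))) (fun x => x) 0 := rfl

theorem pv_A_le_B (words : List String) (hpre : "" ∉ words) :
    ∀ fuel (s : String) i, s ∈ words → (pvBuild words).1.get? s = some i →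
      pvDfs (pvBuild words).2 fuel i + pvChainLen (PySem.Set.ofList words) s ≤ solve_alt words + 1 := by
  obtain ⟨I1, I2, I3, I4, I5⟩ := pvInv_build words
  intro fuel
  induction fuel with
  | zero =>
    intro s i hsw _
    have h1 : pvChainLen (PySem.Set.ofList words) s ≤ solve_alt words := by
      rw [pv_solve_alt_eq]; exact pvLe_maxD (List.mem_map.mpr ⟨s, hsw, rfl⟩) 0
    simp only [pvDfs]; omega
  | succ n ih =>
    intro s i hsw hid
    rw [pvDfs]
    rcases pvMaxD_cases (((pvBuild words).2.getD i PySem.Set.empty).map (pvDfs (pvBuild words).2 n)) 0 with h0 | hmem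
    · have h1 : pvChainLen (PySem.Set.ofList words) s ≤ solve_alt words := by
        rw [pv_solve_alt_eq]; exact pvLe_maxD (List.mem_map.mpr ⟨s, hsw, rfl⟩) 0
      rw [h0]; omega
    · obtain ⟨j, hjmem, hjval⟩ := List.mem_map.mp hmem
      obtain ⟨x, hxw, hpx, hxid⟩ := (I5 s i j hid).mp hjmem
      have hxne : x.toList ≠ [] := pv_toList_ne words hpre hxw
      have hmemws : pvP x ∈ PySem.Set.ofList words := by
        rw [hpx]; exact (PySem.Set.mem_ofList words s).mpr hsw
      have hstep : pvChainLen (PySem.Set.ofList words) x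
          = 1 + pvChainLen (PySem.Set.ofList words) s := by
        rw [pvChainLen_step _ x hmemws hxne, hpx]
      have hih := ih x j hxw hxid
      omega

theorem pvDfs_one_ge (adj : PySem.Dict Int (PySem.Set Int)) (c : Int) :
    1 ≤ pvDfs adj 1 c := by
  rw [pvDfs]
  rcases pvMaxD_cases ((adj.getD c PySem.Set.empty).map (pvDfs adj 0)) 0 with h0 | hmem
  · omega
  · obtain ⟨x, -, hx⟩ := List.mem_map.mp hmem
    have := pvDfs_nonneg adj 0 x; omega

theorem pv_B_le_A (words : List String) (hpre : "" ∉ words) :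
    ∀ n (s : String) i, s.toList.length = n → s ∈ words → (pvBuild words).1.get? s = some i →
      ∀ fuel, fuel + s.toList.length ≤ pvFuel words →
      pvChainLen (PySem.Set.ofList words) s + pvDfs (pvBuild words).2 fuel i ≤ solve words + 1 := by
  obtain ⟨I1, I2, I3, I4, I5⟩ := pvInv_build words
  intro n
  induction n using Nat.strong_induction_on with
  | _ n ih =>
    intro s i hlen hsw hid fuel hfuel
    have hsne : s.toList ≠ [] := pv_toList_ne words hpre hsw
    have hlpos : 0 < s.toList.length := List.length_pos_iff.mpr hsne
    by_cases hp : pvP s ∈ PySem.Set.ofList words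
    · have hstep : pvChainLen (PySem.Set.ofList words) s
          = 1 + pvChainLen (PySem.Set.ofList words) (pvP s) := pvChainLen_step _ s hp hsne
      have hpw : pvP s ∈ words := (PySem.Set.mem_ofList words (pvP s)).mp hp
      obtain ⟨ip, hip⟩ := Option.isSome_iff_exists.mp (I1 s hsw).2
      have hmem : i ∈ ((pvBuild words).2.getD ip PySem.Set.empty : List Int) :=
        (I5 (pvP s) ip i hip).mpr ⟨s, hsw, rfl, hid⟩
      have hge : 1 + pvDfs (pvBuild words).2 fuel i ≤ pvDfs (pvBuild words).2 (fuel + 1) ip := by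
        rw [pvDfs]
        have := pvLe_maxD (l := ((pvBuild words).2.getD ip PySem.Set.empty).map
            (pvDfs (pvBuild words).2 fuel)) (x := pvDfs (pvBuild words).2 fuel i)
          (List.mem_map.mpr ⟨i, hmem, rfl⟩) 0
        omega
      have hplen : (pvP s).toList.length = s.toList.length - 1 := by
        rw [pvP_toList, List.length_dropLast]
      have hih := ih (s.toList.length - 1) (by omega) (pvP s) ip (by omega) hpw hip
        (fuel + 1) (by omega)
      omega
    · have hstep : pvChainLen (PySem.Set.ofList words) s = 1 := by
        rw [pvChainLen]
        simp only [pvP] at hp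
        simp [hp]
      have hgd : (pvBuild words).1.getD s 0 = i := by
        rw [PySem.Dict.getD_eq_get?_getD, hid]; rfl
      have h1 : pvDfs (pvBuild words).2 (pvFuel words) ((pvBuild words).1.getD s 0)
          ≤ solve words := by
        rw [pv_solve_eq]; exact pvLe_maxD (List.mem_map.mpr ⟨s, hsw, rfl⟩) 0
      have h2 : pvDfs (pvBuild words).2 fuel i ≤ pvDfs (pvBuild words).2 (pvFuel words) i :=
        pvDfs_mono _ (by omega) i
      rw [hgd] at h1
      omega

theorem pv_len_le (words : List String) {w : String} (hw : w ∈ words) :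
    1 + w.toList.length ≤ pvFuel words := by
  rw [pvFuel, PySem.List.foldl_add_nat]
  have : w.toList.length ≤ (words.map (fun x => x.toList.length)).sum :=
    List.le_sum_of_mem (List.mem_map.mpr ⟨w, hw, rfl⟩)
  omega

-- ===== VERDICT (by name: the statement is the Claim_ definition above) =====
theorem solve_spec : Claim_equal_solve := by
  intro words _ hpre
  unfold Spec_solve
  obtain ⟨I1, I2, I3, I4, I5⟩ := pvInv_build words
  have hAnn : 0 ≤ solve words := by
    rw [pv_solve_eq]
    rcases pvMaxD_cases (words.map (fun w =>
        pvDfs (pvBuild words).2 (pvFuel words) ((pvBuild words).1.getD w 0))) 0 with h0 | hmem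
    · omega
    · obtain ⟨x, -, hx⟩ := List.mem_map.mp hmem
      have := pvDfs_nonneg (pvBuild words).2 (pvFuel words) ((pvBuild words).1.getD x 0)
      omega
  have hBnn : 0 ≤ solve_alt words := by
    rw [pv_solve_alt_eq]
    rcases pvMaxD_cases (words.map (pvChainLen (PySem.Set.ofList words))) 0 with h0 | hmem
    · omega
    · obtain ⟨x, -, hx⟩ := List.mem_map.mp hmem
      have := pvChainLen_pos (PySem.Set.ofList words) x
      omega
  apply le_antisymm
  · rw [pv_solve_eq]
    rcases pvMaxD_cases (words.map (fun w =>
        pvDfs (pvBuild words).2 (pvFuel words) ((pvBuild words).1.getD w 0))) 0 with h0 | hmem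
    · omega
    · obtain ⟨w, hww, hwv⟩ := List.mem_map.mp hmem
      obtain ⟨iw, hiw⟩ := Option.isSome_iff_exists.mp (I1 w hww).1
      have hgd : (pvBuild words).1.getD w 0 = iw := by
        rw [PySem.Dict.getD_eq_get?_getD, hiw]; rfl
      have hle := pv_A_le_B words hpre (pvFuel words) w iw hww hiw
      have hch := pvChainLen_pos (PySem.Set.ofList words) w
      rw [hgd] at hwv
      omega
  · rw [pv_solve_alt_eq]
    rcases pvMaxD_cases (words.map (pvChainLen (PySem.Set.ofList words))) 0 with h0 | hmem
    · omega
    · obtain ⟨w, hww, hwv⟩ := List.mem_map.mp hmem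
      obtain ⟨iw, hiw⟩ := Option.isSome_iff_exists.mp (I1 w hww).1
      have hle := pv_B_le_A words hpre w.toList.length w iw rfl hww hiw 1
        (by have := pv_len_le words hww; omega)
      have hdfs := pvDfs_one_ge (pvBuild words).2 iw
      omega
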